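-- pv_equiv track=rewrite | github.com/x-alted/wordlist-maker | wordlist-maker.py | build_base_strings
-- ===== SOURCE A (Python) =====
-- import itertools
-- from typing import List, Set, Optional, Callable
--
-- def build_base_strings(phrases: List[str], separators: List[str], max_len: int) -> List[str]:
--     """
--     Build all ordered concatenations of phrases (length 2..max_len)
--     using the given separators. Returns list of base strings.
--     """
--     max_len = min(max_len, len(phrases))
--     bases = []
--     for L in range(2, max_len + 1):
--         for perm in itertools.permutations(phrases, L):
--             for sep in separators:
--                 bases.append(sep.join(perm))
--     if not bases:          # less than 2 phrases -> just return phrases as bases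
--         bases = phrases[:]
--     return bases
-- ===== SOURCE B (Python) =====
-- def removals(rem):
--     """(element, rest-without-it) for each position, in original order."""
--     if not rem:
--         return []
--     head, tail = rem[0], rem[1:]
--     return [(head, tail)] + [(x, [head] + rest) for x, rest in removals(tail)]
--
--
-- def build_base_strings(phrases, separators, max_len):
--     """
--     Build all ordered concatenations of phrases (length 2..max_len)
--     using the given separators, by iterative level-by-level expansion of
--     (partial-permutation, remaining-elements) states instead of itertools.
--     """
--     limit = min(max_len, len(phrases))
--     bases = []
--     for L in range(2, limit + 1):
--         partial = [([], list(phrases))]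
--         for _ in range(L):
--             partial = [(perm + [x], rest)
--                        for perm, rem in partial
--                        for x, rest in removals(rem)]
--         for perm, _ in partial:
--             for sep in separators:
--                 bases.append(sep.join(perm))
--     return bases if bases else list(phrases)
-- ===== Notes on version B (the rewrite author's own statement) =====
-- stated objective: alternative
-- what changed: Replaces the itertools.permutations library call with an iterative level-by-level expansion of (partial permutation, remaining elements) states driven by a recursive removals helper, keeping the original index order so the output is identical.
import Mathlib
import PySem

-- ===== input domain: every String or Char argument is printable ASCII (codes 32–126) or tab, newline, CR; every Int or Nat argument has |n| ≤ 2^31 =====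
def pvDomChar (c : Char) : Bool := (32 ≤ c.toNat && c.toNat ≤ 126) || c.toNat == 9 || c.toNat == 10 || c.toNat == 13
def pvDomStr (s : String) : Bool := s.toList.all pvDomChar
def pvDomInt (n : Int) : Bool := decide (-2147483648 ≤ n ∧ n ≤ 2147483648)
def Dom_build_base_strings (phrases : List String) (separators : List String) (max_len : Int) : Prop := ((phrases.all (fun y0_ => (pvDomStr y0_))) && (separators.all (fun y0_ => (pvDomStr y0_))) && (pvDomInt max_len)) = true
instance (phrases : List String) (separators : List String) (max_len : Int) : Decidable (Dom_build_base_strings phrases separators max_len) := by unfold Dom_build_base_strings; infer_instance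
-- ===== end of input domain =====

-- ===== PORT A =====
def build_base_strings (phrases : List String) (separators : List String) (max_len : Int) : List String :=
  let m := min max_len (phrases.length : Int)
  let bases := (PySem.List.pyRange 2 (m + 1) 1).foldl (fun acc L =>
    (PySem.List.permutations phrases L.toNat).foldl (fun acc perm =>
      separators.foldl (fun acc sep => acc ++ [PySem.Str.join sep perm]) acc) acc) []
  if bases = [] then phrases else bases

-- ===== PORT B =====
-- B (from Source B) replaces the itertools.permutations library call by iterative
-- level-by-level expansion of (partial-permutation, remaining-elements) states.
-- removals(rem): (element, rest-without-it) for each position, in original order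
def bbsRemovals {A : Type} : List A -> List (A × List A)
  | [] => []
  | x :: xs => (x, xs) :: (bbsRemovals xs).map (fun p => (p.1, x :: p.2))

-- one pass of the level-expansion comprehension ('partial = [... for ... in partial ...]')
def bbsStep {A : Type} (partial_ : List (List A × List A)) : List (List A × List A) :=
  partial_.flatMap (fun pr => (bbsRemovals pr.2).map (fun p => (pr.1 ++ [p.1], p.2)))

def build_base_strings_alt (phrases : List String) (separators : List String) (max_len : Int) : List String :=
  let limit := min max_len (phrases.length : Int)
  let bases := (PySem.List.pyRange 2 (limit + 1) 1).foldl (fun acc L =>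
    let partial_ := bbsStep^[L.toNat] [([], phrases)]
    partial_.foldl (fun acc pr =>
      separators.foldl (fun acc sep => acc ++ [PySem.Str.join sep pr.1]) acc) acc) []
  if bases = [] then phrases else bases

-- ===== PRECONDITION & SPEC =====
def Spec_build_base_strings (phrases : List String) (separators : List String) (max_len : Int) (out : List String) : Prop := out = build_base_strings_alt phrases separators max_len
instance (phrases : List String) (separators : List String) (max_len : Int) (out : List String) : Decidable (Spec_build_base_strings phrases separators max_len out) := by unfold Spec_build_base_strings; infer_instance

-- ===== CLAIM (what is proved, stated in full; the proofs are below) =====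
def Claim_equal_build_base_strings : Prop := ∀ (phrases : List String) (separators : List String) (max_len : Int), Dom_build_base_strings phrases separators max_len → Spec_build_base_strings phrases separators max_len (build_base_strings phrases separators max_len)

-- ===== LEMMAS AND PROOFS =====

-- the range/eraseIdx recursion of permutations, abstracted over what is done
-- with the picked element and the rest, is a flatMap over bbsRemovals
theorem bbsRemovals_flatMap {A B : Type} (xs : List A) (F : A -> List A -> List B) :
    (List.range xs.length).flatMap (fun i =>
      match xs[i]? with
      | none => []
      | some v => F v (xs.eraseIdx i)) = (bbsRemovals xs).flatMap (fun p => F p.1 p.2) := by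
  induction xs generalizing F with
  | nil => simp [bbsRemovals]
  | cons x xs ih =>
    rw [List.length_cons, List.range_succ_eq_map]
    simp only [List.flatMap_cons, List.flatMap_map, bbsRemovals]
    simp only [List.getElem?_cons_succ, List.eraseIdx_cons_succ, List.getElem?_cons_zero,
      List.eraseIdx_cons_zero]
    rw [ih (fun v r => F v (x :: r))]
theorem permutations_eq_removals {A : Type} (xs : List A) (L : Nat) :
    PySem.List.permutations xs (L + 1)
      = (bbsRemovals xs).flatMap (fun p => (PySem.List.permutations p.2 L).map (p.1 :: ·)) := by
  rw [show PySem.List.permutations xs (L + 1)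
      = (List.range xs.length).flatMap (fun i =>
          match xs[i]? with
          | none => []
          | some v => (PySem.List.permutations (xs.eraseIdx i) L).map (v :: ·)) from rfl]
  exact bbsRemovals_flatMap xs (fun v r => (PySem.List.permutations r L).map (v :: ·))
theorem bbsStep_iterate {A : Type} (L : Nat) (partial_ : List (List A × List A)) :
    (bbsStep^[L] partial_).map Prod.fst
      = partial_.flatMap (fun pr => (PySem.List.permutations pr.2 L).map (pr.1 ++ ·)) := by
  induction L generalizing partial_ with
  | zero =>
    simp only [Function.iterate_zero, id, PySem.List.permutations, List.map_cons, List.map_nil,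
      List.append_nil]
    induction partial_ with
    | nil => rfl
    | cons p l ihl => simp [ihl]
  | succ L ih =>
    rw [Function.iterate_succ_apply, ih, bbsStep, List.flatMap_assoc]
    refine List.flatMap_congr (fun pr _ => ?_)
    rw [permutations_eq_removals, List.map_flatMap]
    simp only [List.flatMap_map, List.map_map, Function.comp_def]
    refine List.flatMap_congr (fun p _ => ?_)
    refine List.map_congr_left (fun q _ => ?_)
    simp [List.append_assoc]

-- a fold consuming only first components is a fold over the map of Prod.fst
theorem foldl_fst {A B C : Type} (f : C -> A -> C) (l : List (A × B)) (acc : C) :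
    l.foldl (fun acc pr => f acc pr.1) acc = (l.map Prod.fst).foldl f acc := by
  induction l generalizing acc with
  | nil => rfl
  | cons x xs ih => simp [ih]

-- the inner loop of B (over expanded states) equals the inner loop of A (over permutations)
theorem bbs_inner_eq (phrases : List String) (separators : List String) (L : Int)
    (acc : List String) :
    (bbsStep^[L.toNat] [(([] : List String), phrases)]).foldl (fun acc pr =>
        separators.foldl (fun acc sep => acc ++ [PySem.Str.join sep pr.1]) acc) acc
      = (PySem.List.permutations phrases L.toNat).foldl (fun acc perm =>
          separators.foldl (fun acc sep => acc ++ [PySem.Str.join sep perm]) acc) acc := by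
  rw [foldl_fst (fun acc perm => separators.foldl (fun acc sep => acc ++ [PySem.Str.join sep perm]) acc),
    bbsStep_iterate]
  simp

-- ===== VERDICT (by name: the statement is the Claim_ definition above) =====
theorem build_base_strings_spec : Claim_equal_build_base_strings := by
  intro phrases separators max_len _
  unfold Spec_build_base_strings build_base_strings build_base_strings_alt
  have h : (PySem.List.pyRange 2 (min max_len (phrases.length : Int) + 1) 1).foldl (fun acc L =>
        (PySem.List.permutations phrases L.toNat).foldl (fun acc perm =>
          separators.foldl (fun acc sep => acc ++ [PySem.Str.join sep perm]) acc) acc) []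
      = (PySem.List.pyRange 2 (min max_len (phrases.length : Int) + 1) 1).foldl (fun acc L =>
          (bbsStep^[L.toNat] [(([] : List String), phrases)]).foldl (fun acc pr =>
            separators.foldl (fun acc sep => acc ++ [PySem.Str.join sep pr.1]) acc) acc) [] :=
    PySem.List.foldl_congr_mem _ _ _ _ (fun acc L _ => (bbs_inner_eq phrases separators L acc).symm)
  simp only [h]
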